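-- pv_equiv track=rewrite | github.com/JulioChura/laboratoriosTC | lab01/reglas.py | contXY
-- ===== SOURCE A (Python) =====
-- def contXY(cadena):
--     verificaX = False
--     verificaY = False
--     for caracter in cadena:
--         if caracter == "x":
--             verificaX = True
--         if caracter == "y":
--             verificaY = True
--     if verificaX and verificaY:
--         return True
--     else:
--         return False
-- ===== SOURCE B (Python) =====
-- def contXY(cadena):
--     return set("xy").issubset(cadena)
-- ===== Notes on version B (the rewrite author's own statement) =====
-- stated objective: idiomatic
-- what changed: Replaced the flag-accumulating character loop with a set-subset test: build the required set {'x','y'} and ask whether it is a subset of the characters of cadena via set.issubset, a hash-set containment check instead of per-character flag updates.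
import Mathlib
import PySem

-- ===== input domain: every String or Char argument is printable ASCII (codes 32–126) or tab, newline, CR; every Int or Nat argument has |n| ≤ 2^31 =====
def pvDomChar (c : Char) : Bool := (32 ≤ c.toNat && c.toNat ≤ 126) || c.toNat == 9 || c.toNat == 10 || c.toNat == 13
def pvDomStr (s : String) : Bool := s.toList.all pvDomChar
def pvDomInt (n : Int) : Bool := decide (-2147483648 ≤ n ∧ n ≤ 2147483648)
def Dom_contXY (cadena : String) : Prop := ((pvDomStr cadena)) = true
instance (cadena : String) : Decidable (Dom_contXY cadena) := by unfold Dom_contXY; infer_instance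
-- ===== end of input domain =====

-- B replaces A's flag-accumulating loop with a set-subset test set("xy").issubset(cadena) (idiomatic).

-- ===== PORT A =====
-- literal transliteration: loop over the characters carrying the pair (verificaX, verificaY)
def contXYStep (vs : Bool × Bool) (caracter : Char) : Bool × Bool :=
  let vs := if caracter == 'x' then (true, vs.2) else vs
  let vs := if caracter == 'y' then (vs.1, true) else vs
  vs

def contXY (cadena : String) : Bool :=
  let st := cadena.toList.foldl contXYStep (false, false)
  if st.1 && st.2 then true else false

-- ===== PORT B =====
-- set("xy").issubset(cadena): the required set {'x','y'} as a subset of cadena's characters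
def contXY_alt (cadena : String) : Bool :=
  PySem.Set.issubset (PySem.Set.ofList "xy".toList) cadena.toList

-- ===== PRECONDITION & SPEC =====
def Spec_contXY (cadena : String) (out : Bool) : Prop := out = contXY_alt cadena
instance (cadena : String) (out : Bool) : Decidable (Spec_contXY cadena out) := by unfold Spec_contXY; infer_instance

-- ===== CLAIM (what is proved, stated in full; the proofs are below) =====
def Claim_equal_contXY : Prop := ∀ (cadena : String), Dom_contXY cadena → Spec_contXY cadena (contXY cadena)

-- ===== LEMMAS AND PROOFS =====

-- the loop's invariant: starting from any state, the fold ORs in the membership facts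
theorem contXY_fold_inv (l : List Char) (a b : Bool) :
    l.foldl contXYStep (a, b) = (a || l.contains 'x', b || l.contains 'y') := by
  induction l generalizing a b with
  | nil => simp
  | cons c cs ih =>
    simp only [List.foldl_cons, List.contains_cons]
    have hxc : ('x' == c) = (c == 'x') := by rw [BEq.comm]
    have hyc : ('y' == c) = (c == 'y') := by rw [BEq.comm]
    by_cases hx : c = 'x' <;> by_cases hy : c = 'y' <;>
      simp [contXYStep, hx, hy, ih, hxc, hyc]
    rw [beq_eq_false_iff_ne.mpr hx, beq_eq_false_iff_ne.mpr hy]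
    simp

-- ===== VERDICT (by name: the statement is the Claim_ definition above) =====
theorem contXY_spec : Claim_equal_contXY := by
  intro cadena _
  unfold Spec_contXY contXY contXY_alt
  simp [contXY_fold_inv, PySem.Set.issubset, PySem.Set.ofList, PySem.Set.add, PySem.Set.contains]
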